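-- pv_equiv track=rewrite | github.com/Lambosaurus/Advent-of-code | 2025/4/main.py | removable_tiles
-- ===== SOURCE A (Python) =====
-- def is_roll(map, r, c):
--     if r < 0 or r >= len(map):
--         return False
--     row = map[r]
--     if c < 0 or c >= len(row):
--         return False
--     return row[c] == '@'
--
-- def adjacent_rolls(map, r, c):
--     rp, rm, cp, cm = r+1, r-1, c+1, c-1
--     return sum( is_roll(map, rn, cn) for rn, cn in  [
--         (rp, cp), (rp, c), (rp, cm),
--         (r , cp),          (r , cm),
--         (rm, cp), (rm, c), (rm, cm),
--     ])
--
-- def accessable_tiles(map):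
--     for r, row in enumerate(map):
--         for c, tile in enumerate(row):
--             if tile == '@' and adjacent_rolls(map, r, c) < 4:
--                 yield r,c
--
-- def removable_tiles(map):
--     removed = 0
--     while 1:
--         block = 0
--         for r, c in accessable_tiles(map):
--             map[r][c] = 'x'
--             block += 1
--         removed += block
--         if block == 0:
--             return removed
-- ===== SOURCE B (Python) =====
-- def removable_tiles(map):
--     # Worklist peeling over a live set: seed a stack with the tiles that are
--     # currently removable, and after each removal re-examine only the removed
--     # tile's live neighbours.  Unlike the original, `map` is not mutated.
--     cells = [(r, c) for r, row in enumerate(map)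
--              for c, tile in enumerate(row) if tile == '@']
--     alive = set(cells)
--
--     def live_neighbors(p):
--         r, c = p
--         return [q for q in [(r + 1, c + 1), (r + 1, c), (r + 1, c - 1),
--                             (r, c + 1), (r, c - 1),
--                             (r - 1, c + 1), (r - 1, c), (r - 1, c - 1)]
--                 if q in alive]
--
--     stack = [p for p in cells if len(live_neighbors(p)) < 4]
--     removed = 0
--     while stack:
--         p = stack.pop()
--         if p in alive and len(live_neighbors(p)) < 4:
--             alive.remove(p)
--             removed += 1
--             stack.extend(live_neighbors(p))
--     return removed
-- ===== Notes on version B (the rewrite author's own statement) =====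
-- stated objective: alternative
-- what changed: Replaces A's repeated full-grid rescans (each pass recomputes every tile's 8-neighbour count, looping until a pass removes nothing) by one-time worklist peeling on a live set: seed a stack with the currently removable tiles and after each removal re-examine only that tile's live neighbours; A also mutates `map` in place, B does not (the proven equivalence is about the return value).
import Mathlib
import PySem

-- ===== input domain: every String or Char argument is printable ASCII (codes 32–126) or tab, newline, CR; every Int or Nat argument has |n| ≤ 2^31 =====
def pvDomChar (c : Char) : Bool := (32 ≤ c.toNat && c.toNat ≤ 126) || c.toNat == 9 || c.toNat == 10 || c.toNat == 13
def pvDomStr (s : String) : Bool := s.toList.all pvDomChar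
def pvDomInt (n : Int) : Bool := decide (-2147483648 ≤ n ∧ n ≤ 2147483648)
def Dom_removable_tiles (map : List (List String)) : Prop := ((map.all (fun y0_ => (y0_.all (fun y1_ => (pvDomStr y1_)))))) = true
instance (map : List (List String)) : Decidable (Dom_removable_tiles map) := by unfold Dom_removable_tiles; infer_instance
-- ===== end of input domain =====

-- B replaces A's repeated full rescans of the grid by one-time worklist peeling
-- (only a removed tile's neighbours are re-examined); A mutates `map` in place,
-- B does not — the equivalence proved here is about the RETURN value.

-- ===== PORT A =====
-- number of "@" tiles, used only as the termination measure of A's while-loop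
def pvCountAt (m : List (List String)) : Nat :=
  (m.map (fun row => row.countP (fun t => t == "@"))).sum

theorem pvGetD_eq {α : Type} (l : List α) (i : Nat) (d : α) (h : i < l.length) :
    l.getD i d = l[i] := by
  rw [List.getD_eq_getElem?_getD, List.getElem?_eq_getElem h]
  rfl

theorem pvSum_set (l : List Nat) (n : Nat) (a : Nat) (h : n < l.length) :
    (l.set n a).sum + l[n] = l.sum + a := by
  induction l generalizing n with
  | nil => simp at h
  | cons x xs ih =>
    cases n with
    | zero => simp [List.set]; omega
    | succ k =>
      simp only [List.set, List.sum_cons, List.getElem_cons_succ]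
      have := ih k (by simpa using h)
      omega

theorem pvCountP_set (row : List String) (c : Nat) (v : String) (h : c < row.length) :
    (row.set c v).countP (fun t => t == "@") + (if row[c] == "@" then 1 else 0)
      = row.countP (fun t => t == "@") + (if v == "@" then 1 else 0) := by
  induction row generalizing c with
  | nil => simp at h
  | cons x xs ih =>
    cases c with
    | zero => simp [List.countP_cons]; split_ifs <;> simp_all <;> omega
    | succ k =>
      simp only [List.set, List.countP_cons, List.getElem_cons_succ]
      have := ih k (by simpa using h)
      split_ifs at this ⊢ <;> omega

theorem pvCountAt_set (m : List (List String)) (r c : Nat) (hr : r < m.length)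
    (hc : c < m[r].length) (h : m[r][c] = "@") :
    pvCountAt (m.set r (m[r].set c "x")) + 1 = pvCountAt m := by
  unfold pvCountAt
  rw [List.map_set]
  have hs := pvSum_set (m.map (fun row => row.countP (fun t => t == "@"))) r
      ((m[r].set c "x").countP (fun t => t == "@")) (by simpa using hr)
  rw [List.getElem_map] at hs
  have hcp := pvCountP_set m[r] c "x" hc
  rw [h] at hcp
  simp at hcp
  omega

theorem pvCountAt_setD (m : List (List String)) (r c : Nat) (hr : r < m.length)
    (hc : c < (m.getD r []).length) (h : (m.getD r []).getD c "" = "@") :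
    pvCountAt (m.set r ((m.getD r []).set c "x")) + 1 = pvCountAt m := by
  have hrow : m.getD r [] = m[r] := pvGetD_eq m r [] hr
  rw [hrow] at hc h ⊢
  rw [pvGetD_eq m[r] c "" hc] at h
  exact pvCountAt_set m r c hr hc h

-- a cell whose current content reads "@" is in range (out-of-range reads give "")
theorem pvCondRange (m : List (List String)) (r c : Nat)
    (h : (m.getD r []).getD c "" = "@") :
    r < m.length ∧ c < (m.getD r []).length := by
  constructor
  · by_contra hr
    push_neg at hr
    have hnil : m.getD r [] = [] := by
      rw [List.getD_eq_getElem?_getD, List.getElem?_eq_none (by omega)]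
      rfl
    rw [hnil] at h
    simp at h
  · by_contra hc
    push_neg at hc
    have hd : (m.getD r []).getD c "" = "" := by
      rw [List.getD_eq_getElem?_getD, List.getElem?_eq_none (by omega)]
      rfl
    rw [hd] at h
    exact absurd h (by decide)

def is_roll (m : List (List String)) (r c : Int) : Bool :=
  if r < 0 ∨ (m.length : Int) ≤ r then false
  else if c < 0 ∨ (((PySem.List.pyGetD m r []).length : Nat) : Int) ≤ c then false
  else PySem.List.pyGetD (PySem.List.pyGetD m r []) c "" == "@"

def adjacent_rolls (m : List (List String)) (r c : Int) : Int :=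
  (([(r+1, c+1), (r+1, c), (r+1, c-1),
     (r,   c+1),           (r,   c-1),
     (r-1, c+1), (r-1, c), (r-1, c-1)] : List (Int × Int)).map
    (fun q => if is_roll m q.1 q.2 then (1 : Int) else 0)).sum

-- one step of the generator `accessable_tiles` consumed by the mutating for-loop
def passCell (r : Nat) (st : (List (List String)) × Int) (c : Nat) :
    (List (List String)) × Int :=
  if (st.1.getD r []).getD c "" == "@" ∧ adjacent_rolls st.1 r c < 4 then
    (st.1.set r ((st.1.getD r []).set c "x"), st.2 + 1)
  else st

def passRow (st : (List (List String)) × Int) (r : Nat) : (List (List String)) × Int :=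
  (List.range (st.1.getD r []).length).foldl (passCell r) st

-- one full scan of the (mutating) grid: the body of A's while-loop
def passCells (m : List (List String)) : (List (List String)) × Int :=
  (List.range m.length).foldl passRow (m, 0)

theorem pvCellCount (r : Nat) (st : (List (List String)) × Int) (c : Nat) :
    st.2 ≤ (passCell r st c).2 ∧
    (pvCountAt (passCell r st c).1 : Int) + (passCell r st c).2
      = (pvCountAt st.1 : Int) + st.2 := by
  unfold passCell
  split_ifs with h
  · obtain ⟨hat, _⟩ := h
    rw [beq_iff_eq] at hat
    obtain ⟨hr, hc⟩ := pvCondRange st.1 r c hat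
    have := pvCountAt_setD st.1 r c hr hc hat
    dsimp only
    omega
  · exact ⟨le_refl _, rfl⟩

theorem pvFoldCellCount (r : Nat) : ∀ (l : List Nat) (st : (List (List String)) × Int),
    st.2 ≤ (l.foldl (passCell r) st).2 ∧
    (pvCountAt (l.foldl (passCell r) st).1 : Int) + (l.foldl (passCell r) st).2
      = (pvCountAt st.1 : Int) + st.2 := by
  intro l
  induction l with
  | nil => intro st; exact ⟨le_refl _, rfl⟩
  | cons x t ih =>
    intro st
    obtain ⟨h1, h2⟩ := pvCellCount r st x
    obtain ⟨h3, h4⟩ := ih (passCell r st x)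
    simp only [List.foldl_cons]
    exact ⟨by omega, by omega⟩

theorem pvRowCount (st : (List (List String)) × Int) (r : Nat) :
    st.2 ≤ (passRow st r).2 ∧
    (pvCountAt (passRow st r).1 : Int) + (passRow st r).2
      = (pvCountAt st.1 : Int) + st.2 := by
  unfold passRow
  exact pvFoldCellCount r _ st

theorem pvFoldRowCount : ∀ (l : List Nat) (st : (List (List String)) × Int),
    st.2 ≤ (l.foldl passRow st).2 ∧
    (pvCountAt (l.foldl passRow st).1 : Int) + (l.foldl passRow st).2
      = (pvCountAt st.1 : Int) + st.2 := by
  intro l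
  induction l with
  | nil => intro st; exact ⟨le_refl _, rfl⟩
  | cons x t ih =>
    intro st
    obtain ⟨h1, h2⟩ := pvRowCount st x
    obtain ⟨h3, h4⟩ := ih (passRow st x)
    simp only [List.foldl_cons]
    exact ⟨by omega, by omega⟩

theorem pvPassCount (m : List (List String)) :
    0 ≤ (passCells m).2 ∧
    (pvCountAt (passCells m).1 : Int) + (passCells m).2 = (pvCountAt m : Int) := by
  unfold passCells
  have := pvFoldRowCount (List.range m.length) (m, 0)
  dsimp only at this
  exact ⟨by omega, by omega⟩

theorem pvLoopDec (m : List (List String))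
    (hb : ¬ ((passCells m).2 == 0) = true) :
    pvCountAt (passCells m).1 < pvCountAt m := by
  obtain ⟨h1, h2⟩ := pvPassCount m
  simp only [beq_iff_eq] at hb
  omega

def removable_tiles_loop (m : List (List String)) (removed : Int) : Int :=
  if hb : (passCells m).2 == 0 then removed + (passCells m).2
  else removable_tiles_loop (passCells m).1 (removed + (passCells m).2)
termination_by pvCountAt m
decreasing_by
  exact pvLoopDec m hb

def removable_tiles (map : List (List String)) : Int :=
  removable_tiles_loop map 0

-- ===== PORT B =====
def cellsOf (m : List (List String)) : List (Int × Int) :=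
  (PySem.List.enumerate m).flatMap (fun rrow =>
    (PySem.List.enumerate rrow.2).filterMap (fun ct =>
      if ct.2 == "@" then some (rrow.1, ct.1) else none))

def liveNB (alive : PySem.Set (Int × Int)) (p : Int × Int) : List (Int × Int) :=
  ([(p.1+1, p.2+1), (p.1+1, p.2), (p.1+1, p.2-1),
    (p.1,   p.2+1),               (p.1,   p.2-1),
    (p.1-1, p.2+1), (p.1-1, p.2), (p.1-1, p.2-1)] : List (Int × Int)).filter
    (fun q => PySem.Set.contains alive q)

theorem pvFilter_lt {α : Type} (l : List α) (p : α → Bool) (x : α)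
    (hx : x ∈ l) (hpx : p x = false) : (l.filter p).length < l.length := by
  induction l with
  | nil => simp at hx
  | cons a t ih =>
    rcases List.mem_cons.mp hx with h | h
    · subst h
      simp [hpx]
      exact List.length_filter_le p t
    · simp only [List.filter_cons]
      split
      · simpa using Nat.succ_lt_succ (ih h)
      · exact Nat.lt_succ_of_lt (ih h)

def loopB (alive : PySem.Set (Int × Int)) (stack : List (Int × Int)) (removed : Int) : Int :=
  match hs : stack with
  | [] => removed
  | q :: qs =>
    let p := (q :: qs).getLast (by simp)
    let rest := (q :: qs).dropLast
    if PySem.Set.contains alive p ∧ (liveNB alive p).length < 4 then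
      let alive' := PySem.Set.discard alive p
      loopB alive' (rest ++ liveNB alive' p) (removed + 1)
    else
      loopB alive rest removed
termination_by (alive.length, stack.length)
decreasing_by
  · rename_i hcond
    apply Prod.Lex.left
    have hmem : (q :: qs).getLast (by simp) ∈ alive :=
      (PySem.Set.contains_iff alive _).mp hcond.1
    exact pvFilter_lt alive _ _ hmem (by simp)
  · apply Prod.Lex.right
    simp

def removable_tiles_alt (map : List (List String)) : Int :=
  let cells := cellsOf map
  let alive := PySem.Set.ofList cells
  let stack := cells.filter (fun p => (liveNB alive p).length < 4)
  loopB alive stack 0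

-- ===== PRECONDITION & SPEC =====
def Spec_removable_tiles (map : List (List String)) (out : Int) : Prop := out = removable_tiles_alt map
instance (map : List (List String)) (out : Int) : Decidable (Spec_removable_tiles map out) := by unfold Spec_removable_tiles; infer_instance

-- ===== CLAIM (what is proved, stated in full; the proofs are below) =====
def Claim_equal_removable_tiles : Prop := ∀ (map : List (List String)), Dom_removable_tiles map → Spec_removable_tiles map (removable_tiles map)

-- ===== LEMMAS AND PROOFS =====

-- abstract peeling layer: live tiles as a finite set of integer coordinates
def pvOffsets (p : Int × Int) : List (Int × Int) :=
  [(p.1+1, p.2+1), (p.1+1, p.2), (p.1+1, p.2-1),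
   (p.1,   p.2+1),               (p.1,   p.2-1),
   (p.1-1, p.2+1), (p.1-1, p.2), (p.1-1, p.2-1)]

def pvDeg (S : Finset (Int × Int)) (p : Int × Int) : Nat :=
  (pvOffsets p).countP (fun q => decide (q ∈ S))

def pvStep (S T : Finset (Int × Int)) : Prop :=
  ∃ p ∈ S, pvDeg S p < 4 ∧ T = S.erase p

def pvSteps : Finset (Int × Int) → Finset (Int × Int) → Prop :=
  Relation.ReflTransGen pvStep

def pvTerminal (S : Finset (Int × Int)) : Prop := ∀ p ∈ S, 4 ≤ pvDeg S p

def pvOcc (m : List (List String)) : Finset (Int × Int) := (cellsOf m).toFinset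

-- total-lookup views of the grid (placed here for the proofs; pvAt/pvRowLen are the getD chains)
def pvRowLen (m : List (List String)) (i : Nat) : Nat := (m.getD i []).length
def pvAt (m : List (List String)) (i j : Nat) : String := (m.getD i []).getD j ""

theorem pvGetD_set {α : Type} (l : List α) (r i : Nat) (v d : α) (hr : r < l.length) :
    (l.set r v).getD i d = if r = i then v else l.getD i d := by
  rw [List.getD_eq_getElem?_getD, List.getD_eq_getElem?_getD, List.getElem?_set]
  split_ifs with h
  · simp [hr, h]
  · rfl

theorem pvRowLen_eq (m : List (List String)) (i : Nat) (hi : i < m.length) :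
    pvRowLen m i = m[i].length := by
  unfold pvRowLen
  rw [pvGetD_eq m i [] hi]

theorem pvAt_eq (m : List (List String)) (i j : Nat) (hi : i < m.length)
    (hj : j < m[i].length) : pvAt m i j = m[i][j] := by
  unfold pvAt
  rw [pvGetD_eq m i [] hi, pvGetD_eq _ j "" hj]

theorem pvRowLen_set (m : List (List String)) (r c : Nat) (hr : r < m.length) (i : Nat) :
    pvRowLen (m.set r ((m.getD r []).set c "x")) i = pvRowLen m i := by
  unfold pvRowLen
  rw [pvGetD_set m r i _ [] hr]
  split_ifs with h
  · subst h
    simp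
  · rfl

theorem pvAt_set (m : List (List String)) (r c i j : Nat) (hr : r < m.length)
    (hc : c < pvRowLen m r) :
    pvAt (m.set r ((m.getD r []).set c "x")) i j
      = if r = i ∧ c = j then "x" else pvAt m i j := by
  unfold pvAt
  rw [pvGetD_set m r i _ [] hr]
  by_cases hir : r = i
  · subst hir
    rw [if_pos rfl, pvGetD_set _ c j "x" "" hc]
    split_ifs with h1 h2 h2 <;> simp_all
  · rw [if_neg hir, if_neg (fun h => hir h.1)]

theorem pvMem_offsets (p q : Int × Int) :
    q ∈ pvOffsets p ↔ (¬ (q.1 = p.1 ∧ q.2 = p.2) ∧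
      p.1 - 1 ≤ q.1 ∧ q.1 ≤ p.1 + 1 ∧ p.2 - 1 ≤ q.2 ∧ q.2 ≤ p.2 + 1) := by
  simp [pvOffsets, Prod.ext_iff]
  omega

theorem pvOffsets_symm (p q : Int × Int) : q ∈ pvOffsets p ↔ p ∈ pvOffsets q := by
  rw [pvMem_offsets, pvMem_offsets]
  omega

theorem pvDeg_mono {S T : Finset (Int × Int)} (h : S ⊆ T) (p : Int × Int) :
    pvDeg S p ≤ pvDeg T p := by
  apply List.countP_mono_left
  intro x _ hx
  simp only [decide_eq_true_eq] at *
  exact h hx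

theorem pvDeg_erase_of_not_mem_offsets {S : Finset (Int × Int)} {p q : Int × Int}
    (h : p ∉ pvOffsets q) : pvDeg (S.erase p) q = pvDeg S q := by
  unfold pvDeg
  apply List.countP_congr
  intro x hx
  have hxp : x ≠ p := fun he => h (he ▸ hx)
  simp [Finset.mem_erase, hxp]

theorem pvStep_sub {S T : Finset (Int × Int)} (h : pvStep S T) : T ⊆ S := by
  obtain ⟨p, _, _, rfl⟩ := h
  exact Finset.erase_subset p S

theorem pvSteps_sub {S T : Finset (Int × Int)} (h : pvSteps S T) : T ⊆ S := by
  induction h with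
  | refl => exact Finset.Subset.refl _
  | tail _ hstep ih => exact (pvStep_sub hstep).trans ih

theorem pvClosed_step {C S T : Finset (Int × Int)} (hC : pvTerminal C) (hCS : C ⊆ S)
    (h : pvStep S T) : C ⊆ T := by
  obtain ⟨p, hpS, hdeg, rfl⟩ := h
  intro x hx
  rw [Finset.mem_erase]
  refine ⟨?_, hCS hx⟩
  rintro rfl
  exact absurd (lt_of_le_of_lt ((hC x hx).trans (pvDeg_mono hCS x)) hdeg) (lt_irrefl _)

theorem pvClosed_steps {C S T : Finset (Int × Int)} (hC : pvTerminal C) (hCS : C ⊆ S)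
    (h : pvSteps S T) : C ⊆ T := by
  induction h with
  | refl => exact hCS
  | tail _ hstep ih => exact pvClosed_step hC ih hstep

theorem pvUnique {S0 S T : Finset (Int × Int)} (hS : pvSteps S0 S) (hT : pvSteps S0 T)
    (htS : pvTerminal S) (htT : pvTerminal T) : S = T :=
  Finset.Subset.antisymm (pvClosed_steps htS (pvSteps_sub hS) hT)
    (pvClosed_steps htT (pvSteps_sub hT) hS)

-- membership of the cell list / occupied set
theorem pvMem_cellsOf (m : List (List String)) (p : Int × Int) :
    p ∈ cellsOf m ↔ ∃ i j : Nat, i < m.length ∧ j < pvRowLen m i ∧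
      p = ((i : Int), (j : Int)) ∧ pvAt m i j = "@" := by
  unfold cellsOf
  rw [List.mem_flatMap]
  constructor
  · rintro ⟨rr, hrr, hmem⟩
    obtain ⟨i, hi, rfl⟩ := (PySem.List.mem_enumerate_iff m 0 rr).mp hrr
    rw [List.mem_filterMap] at hmem
    obtain ⟨ct, hct, hsome⟩ := hmem
    obtain ⟨j, hj, rfl⟩ := (PySem.List.mem_enumerate_iff _ 0 ct).mp hct
    simp only at hsome
    by_cases hat : (m[i][j] == "@") = true
    · rw [if_pos hat] at hsome
      refine ⟨i, j, hi, ?_, ?_, ?_⟩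
      · rw [pvRowLen_eq m i hi]; exact hj
      · have hp := Option.some.inj hsome
        rw [← hp]
        simp
      · rw [pvAt_eq m i j hi hj]; simpa using hat
    · rw [if_neg hat] at hsome
      exact absurd hsome (by simp)
  · rintro ⟨i, j, hi, hj, rfl, hat⟩
    rw [pvRowLen_eq m i hi] at hj
    rw [pvAt_eq m i j hi hj] at hat
    refine ⟨((i : Int), m[i]), ?_, ?_⟩
    · rw [PySem.List.mem_enumerate_iff]
      exact ⟨i, hi, by simp⟩
    · rw [List.mem_filterMap]
      refine ⟨((j : Int), m[i][j]), ?_, ?_⟩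
      · rw [PySem.List.mem_enumerate_iff]
        exact ⟨j, hj, by simp⟩
      · simp [hat]

theorem pvMem_occ (m : List (List String)) (p : Int × Int) :
    p ∈ pvOcc m ↔ ∃ i j : Nat, i < m.length ∧ j < pvRowLen m i ∧
      p = ((i : Int), (j : Int)) ∧ pvAt m i j = "@" := by
  rw [pvOcc, List.mem_toFinset, pvMem_cellsOf]

theorem pvIs_roll_iff (m : List (List String)) (a b : Int) :
    is_roll m a b = true ↔ (a, b) ∈ pvOcc m := by
  rw [pvMem_occ]
  unfold is_roll
  by_cases h1 : a < 0 ∨ (m.length : Int) ≤ a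
  · rw [if_pos h1]
    simp only [Bool.false_eq_true, false_iff]
    rintro ⟨i, j, hi, hj, heq, hat⟩
    rw [Prod.ext_iff] at heq
    simp only at heq
    omega
  · have ha : ∃ i : Nat, a = (i : Int) := ⟨a.toNat, by omega⟩
    obtain ⟨i, rfl⟩ := ha
    have hi : i < m.length := by omega
    rw [if_neg h1, PySem.List.pyGetD_natCast]
    by_cases h2 : b < 0 ∨ (((m.getD i []).length : Nat) : Int) ≤ b
    · rw [if_pos h2]
      simp only [Bool.false_eq_true, false_iff]
      rintro ⟨i', j, hi', hj, heq, hat⟩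
      rw [Prod.ext_iff] at heq
      simp only [Nat.cast_inj] at heq
      obtain ⟨rfl, rfl⟩ := heq
      unfold pvRowLen at hj
      omega
    · have hb : ∃ j : Nat, b = (j : Int) := ⟨b.toNat, by omega⟩
      obtain ⟨j, rfl⟩ := hb
      have hj : j < (m.getD i []).length := by omega
      rw [if_neg h2, PySem.List.pyGetD_natCast, beq_iff_eq]
      constructor
      · intro hat
        exact ⟨i, j, hi, hj, rfl, hat⟩
      · rintro ⟨i', j', hi', hj', heq, hat⟩
        rw [Prod.ext_iff] at heq
        simp only [Nat.cast_inj] at heq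
        obtain ⟨rfl, rfl⟩ := heq
        exact hat

theorem pvIs_roll_eq (m : List (List String)) (a b : Int) :
    is_roll m a b = decide ((a, b) ∈ pvOcc m) := by
  rcases hd : decide ((a, b) ∈ pvOcc m) with _ | _
  · rcases h : is_roll m a b with _ | _
    · rfl
    · rw [pvIs_roll_iff] at h
      simp [h] at hd
  · exact (pvIs_roll_iff m a b).mpr (by simpa using hd)

theorem pvSumInd (l : List (Int × Int)) (f : Int × Int → Bool) :
    (l.map (fun q => if f q then (1 : Int) else 0)).sum = (l.countP f : Int) := by
  induction l with
  | nil => simp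
  | cons x t ih =>
    simp only [List.map_cons, List.sum_cons, List.countP_cons, ih]
    split_ifs with h
    · simp [h]
      omega
    · simp [h]

theorem pvAdj_deg (m : List (List String)) (r c : Int) :
    adjacent_rolls m r c = (pvDeg (pvOcc m) (r, c) : Int) := by
  unfold adjacent_rolls pvDeg
  rw [pvSumInd]
  congr 1
  apply List.countP_congr
  intro q _
  rw [pvIs_roll_eq]

-- effect of one in-place removal on the occupied set
theorem pvOcc_set_x (m : List (List String)) (r c : Nat) (hr : r < m.length)
    (hc : c < pvRowLen m r) (h : pvAt m r c = "@") :
    pvOcc (m.set r ((m.getD r []).set c "x")) = (pvOcc m).erase ((r : Int), (c : Int)) := by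
  ext p
  obtain ⟨a, b⟩ := p
  rw [Finset.mem_erase, pvMem_occ, pvMem_occ]
  constructor
  · rintro ⟨i, j, hi, hj, heq, hat⟩
    have hi' : i < m.length := by simpa using hi
    rw [pvAt_set m r c i j hr hc] at hat
    rw [pvRowLen_set m r c hr i] at hj
    by_cases hij : r = i ∧ c = j
    · rw [if_pos hij] at hat
      exact absurd hat (by decide)
    · rw [if_neg hij] at hat
      refine ⟨?_, i, j, hi', hj, heq, hat⟩
      intro hcontra
      rw [heq, Prod.ext_iff] at hcontra
      simp only [Nat.cast_inj] at hcontra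
      exact hij ⟨hcontra.1.symm, hcontra.2.symm⟩
  · rintro ⟨hne, i, j, hi, hj, heq, hat⟩
    refine ⟨i, j, by simpa using hi, ?_, heq, ?_⟩
    · rw [pvRowLen_set m r c hr i]
      exact hj
    · rw [pvAt_set m r c i j hr hc]
      rw [if_neg ?_]
      · exact hat
      · rintro ⟨rfl, rfl⟩
        exact hne (by rw [heq])

-- each cell visit of A's pass is (at most) one peeling step
theorem pvCellOcc (r : Nat) (st : (List (List String)) × Int) (c : Nat) :
    pvSteps (pvOcc st.1) (pvOcc (passCell r st c).1) ∧
    ((pvOcc (passCell r st c).1).card : Int) + (passCell r st c).2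
      = ((pvOcc st.1).card : Int) + st.2 := by
  unfold passCell
  split_ifs with h
  · obtain ⟨hat, hadj⟩ := h
    rw [beq_iff_eq] at hat
    obtain ⟨hr, hc⟩ := pvCondRange st.1 r c hat
    have hat' : pvAt st.1 r c = "@" := hat
    have hmem : ((r : Int), (c : Int)) ∈ pvOcc st.1 :=
      (pvMem_occ st.1 _).mpr ⟨r, c, hr, hc, rfl, hat'⟩
    have hdeg : pvDeg (pvOcc st.1) ((r : Int), (c : Int)) < 4 := by
      rw [pvAdj_deg] at hadj
      exact_mod_cast hadj
    have hocc := pvOcc_set_x st.1 r c hr hc hat'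
    dsimp only
    constructor
    · exact Relation.ReflTransGen.single ⟨_, hmem, hdeg, hocc⟩
    · have hcard : (pvOcc (st.1.set r ((st.1.getD r []).set c "x"))).card + 1
          = (pvOcc st.1).card := by
        rw [hocc]
        exact Finset.card_erase_add_one hmem
      omega
  · exact ⟨Relation.ReflTransGen.refl, rfl⟩

theorem pvFoldOcc {g : (List (List String)) × Int → Nat → (List (List String)) × Int}
    (hg : ∀ st x, pvSteps (pvOcc st.1) (pvOcc (g st x).1) ∧
      ((pvOcc (g st x).1).card : Int) + (g st x).2 = ((pvOcc st.1).card : Int) + st.2) :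
    ∀ (l : List Nat) (st), pvSteps (pvOcc st.1) (pvOcc (l.foldl g st).1) ∧
      ((pvOcc (l.foldl g st).1).card : Int) + (l.foldl g st).2
        = ((pvOcc st.1).card : Int) + st.2 := by
  intro l
  induction l with
  | nil => intro st; exact ⟨Relation.ReflTransGen.refl, rfl⟩
  | cons x t ih =>
    intro st
    obtain ⟨h1, h2⟩ := hg st x
    obtain ⟨h3, h4⟩ := ih (g st x)
    simp only [List.foldl_cons]
    exact ⟨h1.trans h3, by omega⟩

theorem pvRowOcc (st : (List (List String)) × Int) (r : Nat) :
    pvSteps (pvOcc st.1) (pvOcc (passRow st r).1) ∧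
    ((pvOcc (passRow st r).1).card : Int) + (passRow st r).2
      = ((pvOcc st.1).card : Int) + st.2 := by
  unfold passRow
  exact pvFoldOcc (fun st c => pvCellOcc r st c) _ st

theorem pvPass_occ (m : List (List String)) :
    pvSteps (pvOcc m) (pvOcc (passCells m).1) ∧
    ((pvOcc (passCells m).1).card : Int) + (passCells m).2 = ((pvOcc m).card : Int) := by
  unfold passCells
  have := pvFoldOcc (fun st r => pvRowOcc st r) (List.range m.length) (m, 0)
  dsimp only at this
  exact ⟨this.1, by omega⟩

-- a pass whose counter does not move did nothing, and every visited cell was not removable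
theorem pvCell_zero (r : Nat) (st : (List (List String)) × Int) (c : Nat)
    (h : (passCell r st c).2 = st.2) :
    passCell r st c = st ∧ ¬ (pvAt st.1 r c = "@" ∧ adjacent_rolls st.1 r c < 4) := by
  unfold passCell at h ⊢
  split_ifs at h ⊢ with hcond
  · exfalso
    have h' : st.2 + 1 = st.2 := h
    omega
  · refine ⟨rfl, ?_⟩
    rintro ⟨h1, h2⟩
    exact hcond ⟨beq_iff_eq.mpr h1, h2⟩

theorem pvFoldCell_zero (r : Nat) : ∀ (l : List Nat) (st : (List (List String)) × Int),
    (l.foldl (passCell r) st).2 = st.2 →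
    l.foldl (passCell r) st = st ∧
      ∀ c ∈ l, ¬ (pvAt st.1 r c = "@" ∧ adjacent_rolls st.1 r c < 4) := by
  intro l
  induction l with
  | nil => intro st _; exact ⟨rfl, by simp⟩
  | cons x t ih =>
    intro st h
    simp only [List.foldl_cons] at h ⊢
    have hm1 := (pvCellCount r st x).1
    have hm2 := (pvFoldCellCount r t (passCell r st x)).1
    have hx : (passCell r st x).2 = st.2 := by omega
    obtain ⟨hid, hnc⟩ := pvCell_zero r st x hx
    rw [hid] at h ⊢
    obtain ⟨hid2, hnc2⟩ := ih st h
    refine ⟨hid2, ?_⟩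
    intro c hcmem
    rcases List.mem_cons.mp hcmem with rfl | hct
    · exact hnc
    · exact hnc2 c hct

theorem pvRow_zero (st : (List (List String)) × Int) (r : Nat)
    (h : (passRow st r).2 = st.2) :
    passRow st r = st ∧
      ∀ c, c < pvRowLen st.1 r → ¬ (pvAt st.1 r c = "@" ∧ adjacent_rolls st.1 r c < 4) := by
  unfold passRow at h ⊢
  obtain ⟨h1, h2⟩ := pvFoldCell_zero r (List.range (st.1.getD r []).length) st h
  exact ⟨h1, fun c hc => h2 c (List.mem_range.mpr hc)⟩

theorem pvFoldRow_zero : ∀ (l : List Nat) (st : (List (List String)) × Int),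
    (l.foldl passRow st).2 = st.2 →
    l.foldl passRow st = st ∧
      ∀ r ∈ l, ∀ c, c < pvRowLen st.1 r →
        ¬ (pvAt st.1 r c = "@" ∧ adjacent_rolls st.1 r c < 4) := by
  intro l
  induction l with
  | nil => intro st _; exact ⟨rfl, by simp⟩
  | cons x t ih =>
    intro st h
    simp only [List.foldl_cons] at h ⊢
    have hm1 := (pvRowCount st x).1
    have hm2 := (pvFoldRowCount t (passRow st x)).1
    have hx : (passRow st x).2 = st.2 := by omega
    obtain ⟨hid, hnc⟩ := pvRow_zero st x hx
    rw [hid] at h ⊢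
    obtain ⟨hid2, hnc2⟩ := ih st h
    refine ⟨hid2, ?_⟩
    intro r hrmem
    rcases List.mem_cons.mp hrmem with rfl | hrt
    · exact hnc
    · exact hnc2 r hrt

theorem pvPass_terminal (m : List (List String)) (h : (passCells m).2 = 0) :
    pvTerminal (pvOcc m) := by
  intro p hp
  obtain ⟨i, j, hi, hj, rfl, hat⟩ := (pvMem_occ m p).mp hp
  have hz := (pvFoldRow_zero (List.range m.length) (m, 0) (by simpa [passCells] using h)).2
  have hnc := hz i (List.mem_range.mpr hi) j hj
  have hna : ¬ adjacent_rolls m (i : Int) (j : Int) < 4 := fun hlt => hnc ⟨hat, hlt⟩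
  rw [pvAdj_deg] at hna
  omega

theorem pvLoopA_spec : ∀ (m : List (List String)) (removed : Int),
    ∃ S, pvSteps (pvOcc m) S ∧ pvTerminal S ∧
      removable_tiles_loop m removed
        = removed + ((pvOcc m).card : Int) - (S.card : Int) := by
  intro m removed
  induction m, removed using removable_tiles_loop.induct with
  | case1 m removed hb =>
    have hb' : (passCells m).2 = 0 := by simpa using hb
    refine ⟨pvOcc m, Relation.ReflTransGen.refl, pvPass_terminal m hb', ?_⟩
    rw [removable_tiles_loop, dif_pos hb]
    omega
  | case2 m removed hb ih =>
    obtain ⟨S, hs, ht, heq⟩ := ih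
    obtain ⟨hstep, hcard⟩ := pvPass_occ m
    refine ⟨S, Relation.ReflTransGen.trans hstep hs, ht, ?_⟩
    rw [removable_tiles_loop, dif_neg hb, heq]
    omega

-- B-side: the worklist loop
theorem pvLiveNB_filter (s : PySem.Set (Int × Int)) (p : Int × Int) :
    liveNB s p = (pvOffsets p).filter (fun q => PySem.Set.contains s q) := rfl

theorem pvLiveNB_len (alive : PySem.Set (Int × Int)) (p : Int × Int) :
    (liveNB alive p).length = pvDeg alive.toFinset p := by
  rw [pvLiveNB_filter]
  unfold pvDeg
  rw [← List.countP_eq_length_filter]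
  apply List.countP_congr
  intro x _
  rcases h : PySem.Set.contains alive x with _ | _
  · have hx : x ∉ alive := fun hm => by
      rw [(PySem.Set.contains_iff alive x).mpr hm] at h
      exact Bool.false_ne_true h.symm
    simp [List.mem_toFinset, hx]
  · have hx := (PySem.Set.contains_iff alive x).mp h
    simp [List.mem_toFinset, hx]

theorem pvToFinset_discard (alive : PySem.Set (Int × Int)) (p : Int × Int) :
    (PySem.Set.discard alive p).toFinset = alive.toFinset.erase p := by
  ext x
  simp [List.mem_toFinset, PySem.Set.mem_discard, Finset.mem_erase, and_comm]

theorem pvDiscard_len {α : Type} [BEq α] [LawfulBEq α] (s : PySem.Set α) (x : α)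
    (hn : List.Nodup s) (hm : x ∈ s) : (PySem.Set.discard s x).length + 1 = s.length := by
  induction s with
  | nil => simp at hm
  | cons a t ih =>
    by_cases hax : a = x
    · subst hax
      have hnt : a ∉ t := (List.nodup_cons.mp hn).1
      have hft : PySem.Set.discard (a :: t) a = t.filter (fun y => !y == a) := by
        simp [PySem.Set.discard, List.filter_cons]
      have hid : t.filter (fun y => !y == a) = t :=
        List.filter_eq_self.mpr (fun y hy => by
          have hne : y ≠ a := fun h => hnt (h ▸ hy)
          simp [hne])
      rw [hft, hid]
      simp
    · have hm' : x ∈ t := by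
        rcases List.mem_cons.mp hm with h | h
        · exact absurd h.symm hax
        · exact h
      have hih := ih (List.nodup_cons.mp hn).2 hm'
      have hcons : PySem.Set.discard (a :: t) x = a :: PySem.Set.discard t x := by
        simp [PySem.Set.discard, List.filter_cons, hax]
      rw [hcons]
      simp only [List.length_cons]
      omega

theorem pvLoopB_spec : ∀ (alive : PySem.Set (Int × Int)) (stack : List (Int × Int))
    (removed : Int), ∀ (S0 : Finset (Int × Int)),
    alive.Nodup →
    pvSteps S0 alive.toFinset →
    (∀ p ∈ alive.toFinset, pvDeg alive.toFinset p < 4 → p ∈ stack) →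
    removed + (alive.length : Int) = (S0.card : Int) →
    ∃ S, pvSteps S0 S ∧ pvTerminal S ∧
      loopB alive stack removed = (S0.card : Int) - (S.card : Int) := by
  intro alive stack removed
  induction alive, stack, removed using loopB.induct with
  | case1 alive removed =>
    intro S0 hnd hsteps hcomp hcount
    refine ⟨alive.toFinset, hsteps, ?_, ?_⟩
    · intro x hx
      by_contra hlt
      exact absurd (hcomp x hx (by omega)) (List.not_mem_nil)
    · simp only [loopB]
      rw [List.toFinset_card_of_nodup hnd]
      omega
  | case2 alive removed q qs p rest hcond alive' ih =>
    have hP : p = (q :: qs).getLast (by simp) := rfl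
    have hR : rest = (q :: qs).dropLast := rfl
    have hA : alive' = PySem.Set.discard alive ((q :: qs).getLast (by simp)) := rfl
    rw [hP] at hcond
    rw [hA, hR, hP] at ih
    intro S0 hnd hsteps hcomp hcount
    have hpal : (q :: qs).getLast (by simp) ∈ alive :=
      (PySem.Set.contains_iff alive _).mp hcond.1
    have hpt : (q :: qs).getLast (by simp) ∈ alive.toFinset := List.mem_toFinset.mpr hpal
    have hdeg : pvDeg alive.toFinset ((q :: qs).getLast (by simp)) < 4 := by
      rw [← pvLiveNB_len]
      exact hcond.2
    have hstep : pvStep alive.toFinset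
        (PySem.Set.discard alive ((q :: qs).getLast (by simp))).toFinset :=
      ⟨_, hpt, hdeg, by rw [pvToFinset_discard]⟩
    have hsteps' := Relation.ReflTransGen.tail hsteps hstep
    have hnd' := PySem.Set.nodup_discard alive ((q :: qs).getLast (by simp)) hnd
    have hlen := pvDiscard_len alive _ hnd hpal
    have hcomp' : ∀ x ∈ (PySem.Set.discard alive ((q :: qs).getLast (by simp))).toFinset,
        pvDeg (PySem.Set.discard alive ((q :: qs).getLast (by simp))).toFinset x < 4 →
        x ∈ (q :: qs).dropLast ++
          liveNB (PySem.Set.discard alive ((q :: qs).getLast (by simp)))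
            ((q :: qs).getLast (by simp)) := by
      intro x hx hdx
      have hxal : x ∈ alive.toFinset := by
        rw [pvToFinset_discard] at hx
        exact Finset.mem_of_mem_erase hx
      have hxnp : x ≠ (q :: qs).getLast (by simp) := by
        rw [pvToFinset_discard] at hx
        exact (Finset.mem_erase.mp hx).1
      by_cases hcase : pvDeg alive.toFinset x < 4
      · have hmem := hcomp x hxal hcase
        have hsplit : (q :: qs).dropLast ++ [(q :: qs).getLast (by simp)] = q :: qs :=
          List.dropLast_append_getLast (by simp)
        rw [← hsplit] at hmem
        rcases List.mem_append.mp hmem with hmm | hmm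
        · exact List.mem_append.mpr (Or.inl hmm)
        · simp only [List.mem_singleton] at hmm
          exact absurd hmm hxnp
      · have hpoff : (q :: qs).getLast (by simp) ∈ pvOffsets x := by
          by_contra hnp
          rw [pvToFinset_discard, pvDeg_erase_of_not_mem_offsets hnp] at hdx
          exact hcase hdx
        have hxoff : x ∈ pvOffsets ((q :: qs).getLast (by simp)) :=
          (pvOffsets_symm _ _).mpr hpoff
        refine List.mem_append.mpr (Or.inr ?_)
        rw [pvLiveNB_filter]
        refine List.mem_filter.mpr ⟨hxoff, ?_⟩
        rw [(PySem.Set.contains_iff _ x)]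
        exact List.mem_toFinset.mp hx
    have hcount' : (removed + 1) +
        ((PySem.Set.discard alive ((q :: qs).getLast (by simp))).length : Int)
        = (S0.card : Int) := by omega
    obtain ⟨S, h1, h2, h3⟩ := ih S0 hnd' hsteps' hcomp' hcount'
    refine ⟨S, h1, h2, ?_⟩
    simp only [loopB]
    rw [if_pos hcond]
    exact h3
  | case3 alive removed q qs p rest hcond ih =>
    have hP : p = (q :: qs).getLast (by simp) := rfl
    have hR : rest = (q :: qs).dropLast := rfl
    rw [hP] at hcond
    rw [hR] at ih
    intro S0 hnd hsteps hcomp hcount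
    have hcomp' : ∀ x ∈ alive.toFinset, pvDeg alive.toFinset x < 4 →
        x ∈ (q :: qs).dropLast := by
      intro x hx hdx
      have hmem := hcomp x hx hdx
      have hsplit : (q :: qs).dropLast ++ [(q :: qs).getLast (by simp)] = q :: qs :=
        List.dropLast_append_getLast (by simp)
      rw [← hsplit] at hmem
      rcases List.mem_append.mp hmem with hmm | hmm
      · exact hmm
      · exfalso
        simp only [List.mem_singleton] at hmm
        apply hcond
        subst hmm
        refine ⟨(PySem.Set.contains_iff alive _).mpr (List.mem_toFinset.mp hx), ?_⟩
        rw [pvLiveNB_len]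
        exact hdx
    obtain ⟨S, h1, h2, h3⟩ := ih S0 hnd hsteps hcomp' hcount
    refine ⟨S, h1, h2, ?_⟩
    simp only [loopB]
    rw [if_neg hcond]
    exact h3

theorem pvAltFinset (m : List (List String)) :
    (PySem.Set.ofList (cellsOf m)).toFinset = pvOcc m := by
  ext x
  simp [List.mem_toFinset, PySem.Set.mem_ofList, pvOcc]

theorem pvAlt_spec (m : List (List String)) :
    ∃ S, pvSteps (pvOcc m) S ∧ pvTerminal S ∧
      removable_tiles_alt m = ((pvOcc m).card : Int) - (S.card : Int) := by
  have hnd := PySem.Set.nodup_ofList (cellsOf m)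
  have hsteps : pvSteps (pvOcc m) (PySem.Set.ofList (cellsOf m)).toFinset := by
    rw [pvAltFinset]
    exact Relation.ReflTransGen.refl
  have hcomp : ∀ p ∈ (PySem.Set.ofList (cellsOf m)).toFinset,
      pvDeg (PySem.Set.ofList (cellsOf m)).toFinset p < 4 →
      p ∈ (cellsOf m).filter
        (fun p => decide ((liveNB (PySem.Set.ofList (cellsOf m)) p).length < 4)) := by
    intro p hp hdp
    refine List.mem_filter.mpr ⟨?_, ?_⟩
    · exact (PySem.Set.mem_ofList _ _).mp (List.mem_toFinset.mp hp)
    · rw [decide_eq_true_eq, pvLiveNB_len]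
      exact hdp
  have hcount : (0 : Int) + ((PySem.Set.ofList (cellsOf m)).length : Int)
      = ((pvOcc m).card : Int) := by
    rw [← pvAltFinset m, List.toFinset_card_of_nodup hnd]
    omega
  obtain ⟨S, h1, h2, h3⟩ := pvLoopB_spec (PySem.Set.ofList (cellsOf m))
    ((cellsOf m).filter
      (fun p => decide ((liveNB (PySem.Set.ofList (cellsOf m)) p).length < 4)))
    0 (pvOcc m) hnd hsteps hcomp hcount
  exact ⟨S, h1, h2, h3⟩

-- ===== VERDICT (by name: the statement is the Claim_ definition above) =====
theorem removable_tiles_spec : Claim_equal_removable_tiles := by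
  intro m _
  unfold Spec_removable_tiles
  obtain ⟨SA, hsA, htA, hA⟩ := pvLoopA_spec m 0
  obtain ⟨SB, hsB, htB, hB⟩ := pvAlt_spec m
  have hSAB : SA = SB := pvUnique hsA hsB htA htB
  show removable_tiles_loop m 0 = removable_tiles_alt m
  rw [hA, hB, hSAB]
  ring
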